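-- pv_equiv track=rewrite | github.com/Vignesh-904390/CT-SCAN | app.py | field_to_list
-- ===== SOURCE A (Python) =====
-- def field_to_list(v):
--     """Convert a JSON field to a list for display (Symptoms/Diagnosis/Medicines/Prevention/Care).
--        Accepts list or comma/semicolon separated string."""
--     if v is None:
--         return []
--     if isinstance(v, list):
--         return [str(x).strip() for x in v if str(x).strip()]
--     if isinstance(v, str):
--         # split on common delimiters
--         parts = []
--         for seg in v.split("\n"):
--             parts.extend(seg.split(";"))
--         final = []
--         for seg in ",".join(parts).split(","):
--             item = seg.strip()
--             if item:
--                 final.append(item)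
--         return final
--     # fallback
--     return [str(v)]
-- ===== SOURCE B (Python) =====
-- def field_to_list(v):
--     """Convert a JSON field to a list for display (Symptoms/Diagnosis/Medicines/Prevention/Care).
--        Accepts list or comma/semicolon separated string."""
--     if v is None:
--         return []
--     if isinstance(v, list):
--         return [str(x).strip() for x in v if str(x).strip()]
--     if isinstance(v, str):
--         # single-pass state machine: accumulate characters of the current token,
--         # flush a stripped non-empty token whenever a delimiter is seen, and once at the end
--         out = []
--         cur = []
--         for ch in v:
--             if ch in "\n;,":
--                 tok = "".join(cur).strip()
--                 if tok:
--                     out.append(tok)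
--                 cur = []
--             else:
--                 cur.append(ch)
--         tok = "".join(cur).strip()
--         if tok:
--             out.append(tok)
--         return out
--     # fallback
--     return [str(v)]
-- ===== Notes on version B (the rewrite author's own statement) =====
-- stated objective: alternative
-- what changed: Replaced A's three staged split passes (split on newline, re-split on ';', join with ',' and split on ',') in the str branch with a single-pass character state machine that accumulates the current token and flushes a stripped non-empty token at each delimiter and at the end.
import Mathlib
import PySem

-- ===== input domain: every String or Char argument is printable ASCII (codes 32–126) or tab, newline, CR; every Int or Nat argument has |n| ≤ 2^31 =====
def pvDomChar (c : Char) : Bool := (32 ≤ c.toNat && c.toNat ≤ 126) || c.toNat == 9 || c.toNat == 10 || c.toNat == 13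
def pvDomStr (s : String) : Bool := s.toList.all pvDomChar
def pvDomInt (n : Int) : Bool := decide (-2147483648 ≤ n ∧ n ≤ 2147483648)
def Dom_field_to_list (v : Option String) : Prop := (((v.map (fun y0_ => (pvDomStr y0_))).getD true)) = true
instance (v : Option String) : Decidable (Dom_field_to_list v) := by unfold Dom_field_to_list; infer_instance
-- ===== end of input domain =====

-- B replaces A's three staged split passes in the str branch by a single-pass character
-- state machine (accumulate the current token, flush a stripped non-empty token at each
-- delimiter and once at the end). Under the Option String signature only the None and
-- str branches of the Python are reachable.

-- ===== PORT A =====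
-- A's str branch, step for step (the separators are the nonempty literals "\n", ";", ",").
def field_to_list (v : Option String) : List String :=
  match v with
  | none => []
  | some s =>
    -- parts = []; for seg in v.split("\n"): parts.extend(seg.split(";"))
    let parts := (PySem.Chars.splitOn s.toList ['\n']).foldl
      (fun acc seg => acc ++ PySem.Chars.splitOn seg [';']) []
    -- final = []; for seg in ",".join(parts).split(","): item = seg.strip(); if item: final.append(item)
    let final := (PySem.Chars.splitOn (PySem.Chars.join [','] parts) [',']).foldl
      (fun acc seg =>
        let item := PySem.Chars.strip seg
        if item ≠ [] then acc ++ [item] else acc) []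
    final.map String.ofList

-- ===== PORT B =====
-- B's str branch: one fold over the characters with state (out, cur); `cur.append(ch)`
-- is `p.2 ++ [ch]`, and the flush `tok = "".join(cur).strip(); if tok: out.append(tok)`
-- is done at each delimiter and once after the loop, exactly as in Source B.
-- the loop body: flush at a delimiter, otherwise append the character to cur
def pvStep (p : List (List Char) × List Char) (ch : Char) : List (List Char) × List Char :=
  if ch = '\n' || ch = ';' || ch = ',' then
    let tok := PySem.Chars.strip p.2
    (if tok ≠ [] then p.1 ++ [tok] else p.1, [])
  else (p.1, p.2 ++ [ch])

def field_to_list_alt (v : Option String) : List String :=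
  match v with
  | none => []
  | some s =>
    let st := s.toList.foldl pvStep ([], [])
    let tok := PySem.Chars.strip st.2
    (if tok ≠ [] then st.1 ++ [tok] else st.1).map String.ofList

-- ===== PRECONDITION & SPEC =====
def Spec_field_to_list (v : Option String) (out : List String) : Prop := out = field_to_list_alt v
instance (v : Option String) (out : List String) : Decidable (Spec_field_to_list v out) := by unfold Spec_field_to_list; infer_instance

-- ===== CLAIM =====
def Claim_equal_field_to_list : Prop := ∀ (v : Option String), Dom_field_to_list v → Spec_field_to_list v (field_to_list v)

-- ===== LEMMAS AND PROOFS =====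

-- generic one-delimiter tokenizer used to characterise both sides
def pvTok (p : Char → Bool) : List Char → List (List Char)
  | [] => [[]]
  | c :: rest => if p c then [] :: pvTok p rest else (pvTok p rest).modifyHead (c :: ·)

-- strip every token and keep the non-empty ones
def pvG (l : List (List Char)) : List (List Char) :=
  (l.map PySem.Chars.strip).filter (· ≠ [])

theorem pvTok_ne_nil (p : Char → Bool) (l : List Char) : pvTok p l ≠ [] := by
  cases l with
  | nil => simp [pvTok]
  | cons c r =>
    simp only [pvTok]
    split
    · simp
    · exact fun h => pvTok_ne_nil p r (List.modifyHead_eq_nil_iff.mp h)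

theorem pvModifyHead_append {α : Type} (f : α → α) (xs ys : List α) (h : xs ≠ []) :
    (xs ++ ys).modifyHead f = xs.modifyHead f ++ ys := by
  cases xs with
  | nil => exact absurd rfl h
  | cons a t => simp

theorem pvGo_eq (d : Char) : ∀ (fuel : Nat) (l cur : List Char) (accs : List (List Char)),
    l.length < fuel →
    PySem.Chars.splitOn.go [d] fuel l cur accs =
      accs.reverse ++ (pvTok (· == d) l).modifyHead (cur.reverse ++ ·) := by
  intro fuel
  induction fuel with
  | zero => intro l cur accs h; omega
  | succ n ih =>
    intro l cur accs h
    cases l with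
    | nil =>
      simp [PySem.Chars.splitOn.go, pvTok]
    | cons c rest =>
      by_cases hc : c = d
      · subst hc
        have hpre : [c].isPrefixOf (c :: rest) = true := by simp [List.isPrefixOf]
        simp only [PySem.Chars.splitOn.go, hpre, if_pos]
        have hd : List.drop [c].length (c :: rest) = rest := by simp
        rw [hd, ih rest [] (cur.reverse :: accs) (by simp at h; omega)]
        simp only [pvTok, beq_self_eq_true, if_true, List.reverse_nil, List.nil_append,
          List.reverse_cons, List.append_assoc, List.singleton_append]
        cases pvTok (fun x => x == c) rest <;> simp
      · have hne : (c == d) = false := by simp [hc]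
        have hpre : [d].isPrefixOf (c :: rest) = false := by
          simp [List.isPrefixOf]; exact fun h' => (hc h'.symm).elim
        simp only [PySem.Chars.splitOn.go, hpre, Bool.false_eq_true, if_false]
        rw [ih rest (c :: cur) accs (by simp at h; omega)]
        simp only [pvTok, hne, Bool.false_eq_true, if_false, List.reverse_cons,
          List.modifyHead_modifyHead]
        congr 2
        funext t
        simp

theorem pvSplitOn_single (d : Char) (s : List Char) :
    PySem.Chars.splitOn s [d] = pvTok (· == d) s := by
  unfold PySem.Chars.splitOn
  rw [pvGo_eq d (s.length + 1) s [] [] (Nat.lt_succ_self _)]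
  cases h : pvTok (· == d) s <;> simp

theorem pvTok_append_delim (q : Char → Bool) (c : Char) (hq : q c = true) (a b : List Char) :
    pvTok q (a ++ c :: b) = pvTok q a ++ pvTok q b := by
  induction a with
  | nil => simp [pvTok, hq]
  | cons x a' ih =>
    simp only [List.cons_append, pvTok]
    split
    · simp [ih]
    · rw [ih, pvModifyHead_append _ _ _ (pvTok_ne_nil q a')]

theorem pvFlatMap_tok (p q : Char → Bool) (s : List Char) :
    (pvTok p s).flatMap (pvTok q) = pvTok (fun c => p c || q c) s := by
  induction s with
  | nil => simp [pvTok]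
  | cons c r ih =>
    by_cases hp : p c = true
    · simp [pvTok, hp, ih]
    · have hp' : p c = false := by simpa using hp
      by_cases hq : q c = true
      · obtain ⟨h, t, hht⟩ := List.exists_cons_of_ne_nil (pvTok_ne_nil p r)
        simp only [pvTok, hp', hq, Bool.false_or, if_true, Bool.false_eq_true, if_false, hht,
          List.modifyHead_cons, List.flatMap_cons]
        rw [← ih, hht]
        simp [pvTok, hq]
      · have hq' : q c = false := by simpa using hq
        obtain ⟨h, t, hht⟩ := List.exists_cons_of_ne_nil (pvTok_ne_nil p r)
        simp only [pvTok, hp', hq', Bool.false_or, Bool.false_eq_true, if_false, hht,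
          List.modifyHead_cons, List.flatMap_cons]
        rw [← ih, hht]
        simp only [List.flatMap_cons, pvTok, hq', Bool.false_eq_true, if_false]
        rw [pvModifyHead_append _ _ _ (pvTok_ne_nil q h)]

theorem pvTok_join (q : Char → Bool) (d : Char) (hq : q d = true) :
    ∀ (P : List (List Char)), P ≠ [] →
      pvTok q (PySem.Chars.join [d] P) = P.flatMap (pvTok q) := by
  intro P
  induction P with
  | nil => intro h; exact absurd rfl h
  | cons a Ps ih =>
    intro _
    cases Ps with
    | nil => simp [PySem.Chars.join, List.intercalate]
    | cons b Ps' =>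
      have hJ : PySem.Chars.join [d] (a :: b :: Ps') = a ++ d :: PySem.Chars.join [d] (b :: Ps') := by
        simp [PySem.Chars.join, List.intercalate]
      rw [hJ, pvTok_append_delim q d hq, ih (by simp)]
      simp

theorem pvFoldl_extend (xs : List (List Char)) (init : List (List Char)) :
    xs.foldl (fun acc seg => acc ++ PySem.Chars.splitOn seg [';']) init
      = init ++ xs.flatMap (fun seg => PySem.Chars.splitOn seg [';']) := by
  induction xs generalizing init with
  | nil => simp
  | cons a t ih => simp [List.foldl_cons, ih, List.append_assoc]

theorem pvModifyHead_fun_id {α : Type} (l : List α) : l.modifyHead (fun x => x) = l := by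
  cases l <;> simp

-- the single-pass state machine computes pvG of the tokenization
theorem pvMachine_eq (s : List Char) : ∀ (out : List (List Char)) (cur : List Char),
    (if PySem.Chars.strip (s.foldl pvStep (out, cur)).2 ≠ []
      then (s.foldl pvStep (out, cur)).1 ++ [PySem.Chars.strip (s.foldl pvStep (out, cur)).2]
      else (s.foldl pvStep (out, cur)).1)
    = out ++ pvG ((pvTok (fun c => ((c == '\n' || c == ';') || c == ',')) s).modifyHead (cur ++ ·)) := by
  induction s with
  | nil =>
    intro out cur
    simp only [List.foldl_nil, pvTok, List.modifyHead_cons, List.append_nil, pvG,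
      List.map_cons, List.map_nil]
    by_cases h : PySem.Chars.strip cur = [] <;> simp [h, List.filter]
  | cons c r ih =>
    intro out cur
    by_cases hc : c = '\n' ∨ c = ';' ∨ c = ','
    · have hb : (c = '\n' || c = ';' || c = ',') = true := by
        rcases hc with h | h | h <;> subst h <;> simp
      have hb2 : ((c == '\n' || c == ';') || c == ',') = true := by
        rcases hc with h | h | h <;> subst h <;> simp
      simp only [List.foldl_cons, pvStep, hb, if_true]
      rw [ih]
      simp only [pvTok, hb2, if_true, List.modifyHead_cons, pvG, List.map_cons]
      by_cases h : PySem.Chars.strip cur = [] <;>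
        simp [h, List.filter, List.append_assoc, pvModifyHead_fun_id]
    · push_neg at hc
      obtain ⟨h1, h2, h3⟩ := hc
      have hb : (c = '\n' || c = ';' || c = ',') = false := by simp [h1, h2, h3]
      have hb2 : ((c == '\n' || c == ';') || c == ',') = false := by simp [h1, h2, h3]
      simp only [List.foldl_cons, pvStep, hb, Bool.false_eq_true, if_false]
      rw [ih]
      simp only [pvTok, hb2, Bool.false_eq_true, if_false, List.modifyHead_modifyHead]
      congr 3
      funext t
      simp

-- ===== VERDICT =====
theorem field_to_list_spec : Claim_equal_field_to_list := by
  intro v _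
  unfold Spec_field_to_list field_to_list field_to_list_alt
  cases v with
  | none => rfl
  | some s =>
    simp only
    rw [pvFoldl_extend, List.nil_append]
    have hbody : (fun (acc : List (List Char)) seg =>
        if PySem.Chars.strip seg ≠ [] then acc ++ [PySem.Chars.strip seg] else acc)
      = (fun acc seg => if decide (PySem.Chars.strip seg ≠ []) = true
          then acc ++ [PySem.Chars.strip seg] else acc) := by
      funext acc seg; simp
    rw [hbody,
      PySem.List.foldl_append_if (fun seg => decide (PySem.Chars.strip seg ≠ [])) PySem.Chars.strip,
      List.nil_append]
    rw [pvMachine_eq s.toList [] []]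
    simp only [List.nil_append, pvG, List.filter_map, Function.comp_def,
      pvModifyHead_fun_id, ne_eq, decide_not]
    congr 2
    rw [pvSplitOn_single ',',
      pvTok_join (· == ',') ',' (by simp)
        ((PySem.Chars.splitOn s.toList ['\n']).flatMap (fun seg => PySem.Chars.splitOn seg [';']))
        ?_]
    · rw [pvSplitOn_single '\n']
      have hfun : (fun seg => PySem.Chars.splitOn seg [';']) = (fun seg => pvTok (· == ';') seg) := by
        funext seg; exact pvSplitOn_single ';' seg
      rw [hfun, pvFlatMap_tok, pvFlatMap_tok]
    · rw [pvSplitOn_single '\n']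
      obtain ⟨h, t, hht⟩ := List.exists_cons_of_ne_nil (pvTok_ne_nil (· == '\n') s.toList)
      rw [hht]
      simp only [List.flatMap_cons, ne_eq]
      intro hc
      exact pvTok_ne_nil (· == ';') h
        (by rw [← pvSplitOn_single ';' h]; exact (List.append_eq_nil_iff.mp hc).1)
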